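-- pv_equiv track=rewrite | github.com/Code-A-187/problem_solving_bank | strings/vacuum_cleaner_route.py | vacuum_returns_start
-- ===== SOURCE A (Python) =====
-- def vacuum_returns_start(moves: str):
--
--     right = 0
--     left = 0
--     up = 0
--     down = 0
--
--     for move in moves:
--         if move == "R":
--             right += 1
--         if move == "L" or move == "R":
--             left += 1
--         if move == "U":
--             up += 1
--         if move == "D":
--             down += 1
--     if right == left and down == up:
--         return True
--     else:
--         return False
-- ===== SOURCE B (Python) =====
-- def vacuum_returns_start(moves: str):
--     delta = {"R": (1, 0), "L": (-1, 0), "U": (0, 1), "D": (0, -1)}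
--     x = sum(delta.get(m, (0, 0))[0] for m in moves)
--     y = sum(delta.get(m, (0, 0))[1] for m in moves)
--     return (x, y) == (0, 0)
-- ===== Notes on version B (the rewrite author's own statement) =====
-- stated objective: alternative
-- what changed: Replaces A's four-counter branching loop and count comparison with a table-driven net-displacement computation: each move is mapped to a (dx, dy) vector and B checks that the summed displacement is (0, 0), which also fixes A's bug where its left counter counts both L and R moves.
-- intended difference: On strings whose D- and U-counts are equal and that either contain an R-move but no L-move, or contain an L-move with equal L- and R-counts, A's left counter (incremented on both L and R moves) makes it return the wrong truth value (e.g. True for "R", False for "LR"), while B returns whether the walk really ends at the start, which is the function's stated purpose. — e.g. on vacuum_returns_start("R"): A returns true, B returns false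
import Mathlib
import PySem

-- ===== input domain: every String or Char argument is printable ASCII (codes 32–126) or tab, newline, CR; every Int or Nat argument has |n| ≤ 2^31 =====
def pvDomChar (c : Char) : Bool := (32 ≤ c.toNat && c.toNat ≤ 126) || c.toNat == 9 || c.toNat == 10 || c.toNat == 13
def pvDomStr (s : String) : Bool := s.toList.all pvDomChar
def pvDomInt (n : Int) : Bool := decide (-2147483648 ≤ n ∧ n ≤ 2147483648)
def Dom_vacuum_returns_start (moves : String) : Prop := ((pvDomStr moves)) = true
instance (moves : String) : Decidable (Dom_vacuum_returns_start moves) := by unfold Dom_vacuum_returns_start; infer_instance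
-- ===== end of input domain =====

-- B computes the net (x, y) displacement via a move→vector table and tests it against (0, 0);
-- this fixes A's bug (its 'left' counter counts both 'L' and 'R'), stated below as D_.

-- ===== PORT A =====
-- one loop over the characters, four integer counters updated by independent ifs, then the final comparison
def vacuum_returns_start (moves : String) : Bool :=
  let st : Int × Int × Int × Int := moves.toList.foldl
    (fun (s : Int × Int × Int × Int) move =>
      let s := if move == 'R' then (s.1 + 1, s.2.1, s.2.2.1, s.2.2.2) else s
      let s := if move == 'L' || move == 'R' then (s.1, s.2.1 + 1, s.2.2.1, s.2.2.2) else s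
      let s := if move == 'U' then (s.1, s.2.1, s.2.2.1 + 1, s.2.2.2) else s
      let s := if move == 'D' then (s.1, s.2.1, s.2.2.1, s.2.2.2 + 1) else s
      s)
    (0, 0, 0, 0)
  if st.1 = st.2.1 ∧ st.2.2.2 = st.2.2.1 then true else false

-- ===== PORT B =====
-- delta = {"R": (1,0), "L": (-1,0), "U": (0,1), "D": (0,-1)}; x, y = the two summed components; (x, y) == (0, 0)
def vacuum_returns_start_alt (moves : String) : Bool :=
  let delta : PySem.Dict Char (Int × Int) :=
    PySem.Dict.ofList [('R', (1, 0)), ('L', (-1, 0)), ('U', (0, 1)), ('D', (0, -1))]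
  let x : Int := moves.toList.foldl (fun a m => a + (PySem.Dict.getD delta m (0, 0)).1) 0
  let y : Int := moves.toList.foldl (fun a m => a + (PySem.Dict.getD delta m (0, 0)).2) 0
  (x, y) == ((0 : Int), (0 : Int))

-- ===== PRECONDITION & SPEC =====
-- On strings with equal D- and U-counts that either contain an R-move but no L-move, or contain an
-- L-move with equal L- and R-counts, A's left counter (incremented on both L and R moves) yields the wrong truth value
-- (True for "R", False for "LR"); B returns whether the walk really ends at the start, the intended value.
def D_vacuum_returns_start (moves : String) : Prop :=
  moves.toList.count 'D' = moves.toList.count 'U' ∧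
  ((moves.toList.count 'L' = 0 ∧ moves.toList.count 'R' ≠ 0) ∨
   (moves.toList.count 'L' ≠ 0 ∧ moves.toList.count 'L' = moves.toList.count 'R'))
instance (moves : String) : Decidable (D_vacuum_returns_start moves) := by unfold D_vacuum_returns_start; infer_instance

def Spec_vacuum_returns_start (moves : String) (out : Bool) : Prop := ¬ D_vacuum_returns_start moves → out = vacuum_returns_start_alt moves
instance (moves : String) (out : Bool) : Decidable (Spec_vacuum_returns_start moves out) := by unfold Spec_vacuum_returns_start; infer_instance

def pvDiffWitness_vacuum_returns_start : String := "R"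
def pvDiffWitnessOut_vacuum_returns_start : Bool × Bool := (true, false)

-- ===== CLAIM (what is proved, stated in full; the proofs are below) =====
def Claim_unchanged_vacuum_returns_start : Prop := ∀ (moves : String), Dom_vacuum_returns_start moves → Spec_vacuum_returns_start moves (vacuum_returns_start moves)
def Claim_changed_vacuum_returns_start : Prop := Dom_vacuum_returns_start (pvDiffWitness_vacuum_returns_start) ∧ D_vacuum_returns_start (pvDiffWitness_vacuum_returns_start) ∧ vacuum_returns_start (pvDiffWitness_vacuum_returns_start) = pvDiffWitnessOut_vacuum_returns_start.1 ∧ vacuum_returns_start_alt (pvDiffWitness_vacuum_returns_start) = pvDiffWitnessOut_vacuum_returns_start.2 ∧ pvDiffWitnessOut_vacuum_returns_start.1 ≠ pvDiffWitnessOut_vacuum_returns_start.2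
def Claim_exact_vacuum_returns_start : Prop := ∀ (moves : String), Dom_vacuum_returns_start moves → D_vacuum_returns_start moves → vacuum_returns_start moves ≠ vacuum_returns_start_alt moves

-- ===== LEMMAS AND PROOFS =====

-- A's loop invariant: each counter accumulates the corresponding character count ('left' counts L AND R).
theorem pvFoldInvA (l : List Char) (r lf u d : Int) :
    l.foldl
      (fun (s : Int × Int × Int × Int) move =>
        let s := if move == 'R' then (s.1 + 1, s.2.1, s.2.2.1, s.2.2.2) else s
        let s := if move == 'L' || move == 'R' then (s.1, s.2.1 + 1, s.2.2.1, s.2.2.2) else s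
        let s := if move == 'U' then (s.1, s.2.1, s.2.2.1 + 1, s.2.2.2) else s
        let s := if move == 'D' then (s.1, s.2.1, s.2.2.1, s.2.2.2 + 1) else s
        s)
      (r, lf, u, d)
    = (r + l.count 'R', lf + l.count 'L' + l.count 'R', u + l.count 'U', d + l.count 'D') := by
  induction l generalizing r lf u d with
  | nil => simp
  | cons c t ih =>
    simp only [List.foldl_cons, List.count_cons]
    by_cases hR : c = 'R' <;> by_cases hL : c = 'L' <;>
      by_cases hU : c = 'U' <;> by_cases hD : c = 'D' <;>
      simp_all [ih] <;> ring_nf <;> simp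


-- the move→vector table, as an if-chain
theorem pvDelta (c : Char) :
    PySem.Dict.getD (PySem.Dict.ofList [('R', ((1 : Int), (0 : Int))), ('L', (-1, 0)), ('U', (0, 1)), ('D', (0, -1))]) c (0, 0)
    = if c = 'R' then (1, 0) else if c = 'L' then (-1, 0) else if c = 'U' then (0, 1) else if c = 'D' then (0, -1) else (0, 0) := by
  have h : PySem.Dict.ofList [('R', ((1 : Int), (0 : Int))), ('L', (-1, 0)), ('U', (0, 1)), ('D', (0, -1))]
      = PySem.Dict.mk [('R', ((1 : Int), (0 : Int))), ('L', (-1, 0)), ('U', (0, 1)), ('D', (0, -1))] := by rfl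
  rw [h, PySem.Dict.getD_eq_get?_getD]
  simp only [PySem.Dict.get?_mk_cons]
  split_ifs <;> simp_all [PySem.Dict.get?, @eq_comm Char]

-- B's x-sum is count R − count L.
theorem pvFoldInvBx (l : List Char) (a : Int) :
    l.foldl (fun a m => a + (PySem.Dict.getD (PySem.Dict.ofList [('R', ((1 : Int), (0 : Int))), ('L', (-1, 0)), ('U', (0, 1)), ('D', (0, -1))]) m (0, 0)).1) a
    = a + l.count 'R' - l.count 'L' := by
  induction l generalizing a with
  | nil => simp
  | cons c t ih =>
    rw [List.foldl_cons, ih, pvDelta]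
    simp only [List.count_cons]
    by_cases hR : c = 'R' <;> by_cases hL : c = 'L' <;> by_cases hU : c = 'U' <;> by_cases hD : c = 'D' <;>
      subst_vars <;> simp_all <;> omega

-- B's y-sum is count U − count D.
theorem pvFoldInvBy (l : List Char) (a : Int) :
    l.foldl (fun a m => a + (PySem.Dict.getD (PySem.Dict.ofList [('R', ((1 : Int), (0 : Int))), ('L', (-1, 0)), ('U', (0, 1)), ('D', (0, -1))]) m (0, 0)).2) a
    = a + l.count 'U' - l.count 'D' := by
  induction l generalizing a with
  | nil => simp
  | cons c t ih =>
    rw [List.foldl_cons, ih, pvDelta]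
    simp only [List.count_cons]
    by_cases hR : c = 'R' <;> by_cases hL : c = 'L' <;> by_cases hU : c = 'U' <;> by_cases hD : c = 'D' <;>
      subst_vars <;> simp_all <;> omega

-- Boolean characterisations of the two ports in terms of character counts.
theorem pvCharA (moves : String) :
    vacuum_returns_start moves
    = (decide (moves.toList.count 'L' = 0) && decide (moves.toList.count 'D' = moves.toList.count 'U')) := by
  unfold vacuum_returns_start
  simp only [pvFoldInvA]
  split_ifs with h
  · obtain ⟨h1, h2⟩ := h
    have hL : moves.toList.count 'L' = 0 := by omega
    have hDU : moves.toList.count 'D' = moves.toList.count 'U' := by omega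
    simp [hL, hDU]
  · by_cases hL : moves.toList.count 'L' = 0 <;>
      by_cases hDU : moves.toList.count 'D' = moves.toList.count 'U'
    · exact absurd ⟨by omega, by omega⟩ h
    · simp [hL, hDU]
    · simp [hL, hDU]
    · simp [hL, hDU]

theorem pvCharB (moves : String) :
    vacuum_returns_start_alt moves
    = (decide (moves.toList.count 'L' = moves.toList.count 'R') && decide (moves.toList.count 'D' = moves.toList.count 'U')) := by
  unfold vacuum_returns_start_alt
  simp only [pvFoldInvBx, pvFoldInvBy, zero_add]
  by_cases h1 : moves.toList.count 'L' = moves.toList.count 'R' <;>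
    by_cases h2 : moves.toList.count 'D' = moves.toList.count 'U' <;>
    simp [Prod.ext_iff, h1, h2] <;> omega

-- ===== VERDICT (by name: the statements are the Claim_ definitions above) =====
theorem vacuum_returns_start_spec : Claim_unchanged_vacuum_returns_start := by
  intro moves _ hnd
  unfold D_vacuum_returns_start at hnd
  rw [pvCharA, pvCharB]
  by_cases h2 : moves.toList.count 'D' = moves.toList.count 'U'
  · simp only [h2, decide_true, Bool.and_true]
    by_cases hL : moves.toList.count 'L' = 0
    · have hR : moves.toList.count 'R' = 0 := by
        by_contra hR
        exact hnd ⟨h2, Or.inl ⟨hL, hR⟩⟩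
      simp [hL, hR]
    · have hne : moves.toList.count 'L' ≠ moves.toList.count 'R' := by
        intro he
        exact hnd ⟨h2, Or.inr ⟨hL, he⟩⟩
      simp [hL, hne]
  · simp [h2]

theorem vacuum_returns_start_changed : Claim_changed_vacuum_returns_start := by
  unfold Claim_changed_vacuum_returns_start; decide

theorem vacuum_returns_start_tight : Claim_exact_vacuum_returns_start := by
  intro moves _ hd
  obtain ⟨h2, hd⟩ := hd
  rw [pvCharA, pvCharB]
  rcases hd with ⟨hL, hR⟩ | ⟨hL, he⟩
  · simp [hL, h2]
    omega
  · simp [h2, he]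
    omega
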